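-- pv_equiv track=rewrite | github.com/how-dawn/AdventOfCode | day2/day2_1.py | check
-- ===== SOURCE A (Python) =====
-- def check(lines, standard=[12, 13, 14]):
--     valid = []
--     for id, line in lines.items():
--         flag = True
--         for elem in line:
--             if elem[0] <= standard[0] and elem[1] <= standard[1] and elem[2] <= standard[2]:
--                 continue
--             else:
--                 flag = False
--                 break
--         if flag: valid.append(id)
--     return valid
-- ===== SOURCE B (Python) =====
-- def check(lines, standard=[12, 13, 14]):
--     # reduce each game to its column-wise maxima and compare once per column
--     return [id for id, line in lines.items()
--             if all(max(col) <= lim for col, lim in zip(zip(*line), standard))]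
-- ===== Notes on version B (the rewrite author's own statement) =====
-- stated objective: simpler
-- what changed: Replaces A's per-draw early-exit flag loop with a comprehension that transposes each game's draws into columns and compares each column's maximum against its limit once.
-- outside the precondition, e.g. on check({1: []}, []): A returns [1], B returns [1]; on check({1: [(99, 0, 0)]}, [0]): A returns [], B returns []
import Mathlib
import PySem

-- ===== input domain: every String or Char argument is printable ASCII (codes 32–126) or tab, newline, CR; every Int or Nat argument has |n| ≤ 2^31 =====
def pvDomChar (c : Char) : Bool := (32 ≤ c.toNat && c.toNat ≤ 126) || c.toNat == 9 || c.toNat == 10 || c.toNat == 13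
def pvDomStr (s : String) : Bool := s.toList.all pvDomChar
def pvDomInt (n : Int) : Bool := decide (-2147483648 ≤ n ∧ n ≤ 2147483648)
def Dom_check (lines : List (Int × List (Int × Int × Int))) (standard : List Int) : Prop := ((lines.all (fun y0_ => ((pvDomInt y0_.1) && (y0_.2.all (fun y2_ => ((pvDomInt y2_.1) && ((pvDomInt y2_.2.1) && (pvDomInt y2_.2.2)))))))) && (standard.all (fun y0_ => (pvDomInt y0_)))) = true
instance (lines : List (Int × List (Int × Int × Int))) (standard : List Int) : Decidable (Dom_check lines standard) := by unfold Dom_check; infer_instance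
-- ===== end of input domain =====

-- B replaces A's per-draw early-exit flag loop by a column-wise reduce-to-maxima
-- comprehension (objective: simpler/idiomatic).

-- ===== PORT A =====
-- inner 'for elem in line' loop with flag/break; standard[0..2] are in range on
-- every input admitted by Pre_check (3 ≤ standard.length), so the .getD 0 default
-- is never taken there.
def checkLoop : List (Int × Int × Int) → List Int → Bool
  | [], _ => true
  | e :: rest, standard =>
    if e.1 ≤ (PySem.List.pyGet? standard 0).getD 0
        ∧ e.2.1 ≤ (PySem.List.pyGet? standard 1).getD 0
        ∧ e.2.2 ≤ (PySem.List.pyGet? standard 2).getD 0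
    then checkLoop rest standard
    else false

def check (lines : List (Int × List (Int × Int × Int))) (standard : List Int) : List Int :=
  lines.foldl (fun valid p => if checkLoop p.2 standard then valid ++ [p.1] else valid) []

-- ===== PORT B =====
-- zip(*line): the columns of a list of triples ([] for an empty line)
def colsOf (line : List (Int × Int × Int)) : List (List Int) :=
  if line = [] then []
  else [line.map (·.1), line.map (·.2.1), line.map (·.2.2)]

-- all(max(col) <= lim for col, lim in zip(zip(*line), standard)); every col is
-- nonempty (line nonempty), so max?'s .getD 0 default is never taken.
def fitsB (line : List (Int × Int × Int)) (standard : List Int) : Bool :=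
  ((colsOf line).zip standard).all
    (fun cl => (PySem.List.max? cl.1 (fun y => y)).getD 0 ≤ cl.2)

def check_alt (lines : List (Int × List (Int × Int × Int))) (standard : List Int) : List Int :=
  (lines.filter (fun p => fitsB p.2 standard)).map (·.1)

-- ===== PRECONDITION & SPEC =====
-- Pre_check requires the bag to carry three limits: on shorter standards A's lazy
-- indexing of standard[0..2] raises IndexError whenever the scan evaluates a missing
-- limit; on the degenerate shorter inputs where A still returns (every game's first
-- draw already fails on a present column, or all draw lists are empty), B happens to
-- return the same list, but they lie outside the natural three-limit domain.
def Pre_check (lines : List (Int × List (Int × Int × Int))) (standard : List Int) : Prop :=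
  3 ≤ standard.length
instance (lines : List (Int × List (Int × Int × Int))) (standard : List Int) : Decidable (Pre_check lines standard) := by unfold Pre_check; infer_instance

def pvWitness_check : (List (Int × List (Int × Int × Int))) × List Int :=
  ([(1, [(1, 2, 3), (4, 5, 6)]), (2, [(99, 0, 0)])], [12, 13, 14])

def Spec_check (lines : List (Int × List (Int × Int × Int))) (standard : List Int) (out : List Int) : Prop := out = check_alt lines standard
instance (lines : List (Int × List (Int × Int × Int))) (standard : List Int) (out : List Int) : Decidable (Spec_check lines standard out) := by unfold Spec_check; infer_instance

-- ===== CLAIM (what is proved, stated in full; the proofs are below) =====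
def Claim_equal_check : Prop := ∀ (lines : List (Int × List (Int × Int × Int))) (standard : List Int), Dom_check lines standard → Pre_check lines standard → Spec_check lines standard (check lines standard)

-- ===== LEMMAS AND PROOFS =====

theorem foldl_max_le_iff (t : List Int) (x s : Int) :
    t.foldl max x ≤ s ↔ x ≤ s ∧ ∀ y ∈ t, y ≤ s := by
  induction t generalizing x with
  | nil => simp
  | cons h tl ih =>
    simp only [List.foldl_cons, ih, max_le_iff, List.mem_cons]
    constructor
    · rintro ⟨⟨hx, hh⟩, hall⟩
      exact ⟨hx, fun y hy => by rcases hy with rfl | hy; exact hh; exact hall y hy⟩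
    · rintro ⟨hx, hall⟩
      exact ⟨⟨hx, hall h (Or.inl rfl)⟩, fun y hy => hall y (Or.inr hy)⟩

theorem checkLoop_iff (line : List (Int × Int × Int)) (s0 s1 s2 : Int) (rest : List Int) :
    checkLoop line (s0 :: s1 :: s2 :: rest) = true ↔
      ∀ e ∈ line, e.1 ≤ s0 ∧ e.2.1 ≤ s1 ∧ e.2.2 ≤ s2 := by
  induction line with
  | nil => simp [checkLoop]
  | cons e tl ih =>
    have h0 : PySem.List.pyGet? (s0 :: s1 :: s2 :: rest) 0 = some s0 :=
      PySem.List.pyGet?_zero_cons _ _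
    have h1 : PySem.List.pyGet? (s0 :: s1 :: s2 :: rest) 1 = some s1 := by
      rw [show (1 : Int) = ((0 : Nat) : Int) + 1 by norm_num,
        PySem.List.pyGet?_cons_succ]
      exact_mod_cast PySem.List.pyGet?_zero_cons _ _
    have h2 : PySem.List.pyGet? (s0 :: s1 :: s2 :: rest) 2 = some s2 := by
      rw [show (2 : Int) = ((1 : Nat) : Int) + 1 by norm_num,
        PySem.List.pyGet?_cons_succ,
        show ((1 : Nat) : Int) = ((0 : Nat) : Int) + 1 by norm_num,
        PySem.List.pyGet?_cons_succ]
      exact_mod_cast PySem.List.pyGet?_zero_cons _ _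
    simp only [checkLoop, h0, h1, h2, Option.getD_some]
    by_cases h : e.1 ≤ s0 ∧ e.2.1 ≤ s1 ∧ e.2.2 ≤ s2
    · simp only [if_pos h, ih, List.mem_cons]
      constructor
      · intro hall f hf
        rcases hf with rfl | hf
        · exact h
        · exact hall f hf
      · intro hall f hf
        exact hall f (Or.inr hf)
    · simp only [if_neg h]
      constructor
      · intro hfalse
        exact absurd hfalse (by simp)
      · intro hall
        exact absurd (hall e (List.mem_cons_self)) h

theorem max_map_le_iff (line : List (Int × Int × Int)) (f : (Int × Int × Int) → Int)
    (s : Int) (h : line ≠ []) :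
    ((PySem.List.max? (line.map f) (fun y => y)).getD 0 ≤ s ↔ ∀ e ∈ line, f e ≤ s) := by
  cases line with
  | nil => exact absurd rfl h
  | cons e tl =>
    simp only [List.map_cons, PySem.List.max?_id_cons, Option.getD_some]
    rw [foldl_max_le_iff]
    simp only [List.mem_map, List.mem_cons, forall_exists_index]
    constructor
    · rintro ⟨hfe, hall⟩ x hx
      rcases hx with rfl | hx
      · exact hfe
      · exact hall (f x) x ⟨hx, rfl⟩
    · intro hall
      refine ⟨hall e (Or.inl rfl), ?_⟩
      rintro y x ⟨hx, rfl⟩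
      exact hall x (Or.inr hx)

theorem fitsB_iff (line : List (Int × Int × Int)) (s0 s1 s2 : Int) (rest : List Int) :
    fitsB line (s0 :: s1 :: s2 :: rest) = true ↔
      ∀ e ∈ line, e.1 ≤ s0 ∧ e.2.1 ≤ s1 ∧ e.2.2 ≤ s2 := by
  by_cases h : line = []
  · subst h; simp [fitsB, colsOf]
  · simp only [fitsB, colsOf, if_neg h, List.zip_cons_cons, List.zip_nil_left,
      List.all_cons, List.all_nil, Bool.and_true, Bool.and_eq_true, decide_eq_true_eq]
    rw [max_map_le_iff _ _ _ h, max_map_le_iff _ _ _ h, max_map_le_iff _ _ _ h]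
    constructor
    · rintro ⟨h1, h2, h3⟩ e he; exact ⟨h1 e he, h2 e he, h3 e he⟩
    · intro hall
      exact ⟨fun e he => (hall e he).1, fun e he => (hall e he).2.1,
        fun e he => (hall e he).2.2⟩

theorem loop_eq_fits (line : List (Int × Int × Int)) (s0 s1 s2 : Int) (rest : List Int) :
    checkLoop line (s0 :: s1 :: s2 :: rest) = fitsB line (s0 :: s1 :: s2 :: rest) := by
  rw [Bool.eq_iff_iff, checkLoop_iff, fitsB_iff]

-- ===== VERDICT (by name: the statement is the Claim_ definition above) =====
theorem check_spec : Claim_equal_check := by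
  intro lines standard _ hpre
  unfold Spec_check check check_alt
  obtain ⟨s0, s1, s2, rest, rfl⟩ :
      ∃ s0 s1 s2 rest, standard = s0 :: s1 :: s2 :: rest := by
    match standard, hpre with
    | a :: b :: c :: r, _ => exact ⟨a, b, c, r, rfl⟩
  rw [PySem.List.foldl_append_if (fun p => checkLoop p.2 (s0 :: s1 :: s2 :: rest)) Prod.fst]
  rw [List.nil_append]
  congr 1
  exact List.filter_congr (fun p _ => loop_eq_fits p.2 s0 s1 s2 rest)
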